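-- pv_equiv track=rewrite | github.com/Anithabonthu/Leetcode- | 2690-house-robber-iv/2690-house-robber-iv.py | func
-- ===== SOURCE A (Python) =====
-- def func(val,a,k):
--     c=0
--     i=0
--     while i<len(a):
--         if a[i]<=val:
--             c+=1
--             i+=1
--         i+=1
--     return c>=k
-- ===== SOURCE B (Python) =====
-- def func(val, a, k):
--     # DP over the array: skip = best count with previous element not chosen,
--     # take = best count with previous element chosen.
--     skip = take = 0
--     for x in a:
--         skip, take = max(skip, take), (skip + 1 if x <= val else max(skip, take))
--     return max(skip, take) >= k
-- ===== Notes on version B (the rewrite author's own statement) =====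
-- stated objective: alternative
-- what changed: Replaces the greedy take-and-skip-next index scan with a skip/take dynamic-programming fold that maintains the best non-adjacent counts with the previous element unchosen/chosen and compares their max with k.
import Mathlib
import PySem

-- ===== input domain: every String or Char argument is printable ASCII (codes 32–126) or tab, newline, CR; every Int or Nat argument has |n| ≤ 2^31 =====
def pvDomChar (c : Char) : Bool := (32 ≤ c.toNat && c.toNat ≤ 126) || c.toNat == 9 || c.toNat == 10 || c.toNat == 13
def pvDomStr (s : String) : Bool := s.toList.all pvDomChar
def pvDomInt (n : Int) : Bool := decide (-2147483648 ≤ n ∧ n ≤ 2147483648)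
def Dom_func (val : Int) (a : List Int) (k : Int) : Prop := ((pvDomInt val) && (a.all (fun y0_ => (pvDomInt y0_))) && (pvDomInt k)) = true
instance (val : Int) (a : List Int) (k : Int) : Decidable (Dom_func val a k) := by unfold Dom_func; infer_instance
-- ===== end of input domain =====

-- B replaces A's greedy take-and-skip-next scan with a skip/take dynamic-programming fold (alternative decomposition, same cost).


-- ===== PORT A =====
-- Greedy while-loop of A as structural recursion on the list: if a[i]<=val,
-- count it and advance i by 2 (skip the next element), else advance by 1.
def aLoop (val : Int) : List Int → Int
  | [] => 0
  | [x] => if x ≤ val then 1 else 0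
  | x :: y :: r => if x ≤ val then 1 + aLoop val r else aLoop val (y :: r)

def func (val : Int) (a : List Int) (k : Int) : Bool := decide (aLoop val a ≥ k)

-- ===== PORT B =====
def bStep (val : Int) (p : Int × Int) (x : Int) : Int × Int :=
  (max p.1 p.2, if x ≤ val then p.1 + 1 else max p.1 p.2)

def func_alt (val : Int) (a : List Int) (k : Int) : Bool :=
  decide (max (a.foldl (bStep val) (0, 0)).1 (a.foldl (bStep val) (0, 0)).2 ≥ k)

-- ===== PRECONDITION & SPEC =====
def Spec_func (val : Int) (a : List Int) (k : Int) (out : Bool) : Prop := out = func_alt val a k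
instance (val : Int) (a : List Int) (k : Int) (out : Bool) : Decidable (Spec_func val a k out) := by unfold Spec_func; infer_instance

-- ===== CLAIM (what is proved, stated in full; the proofs are below) =====
def Claim_equal_func : Prop := ∀ (val : Int) (a : List Int) (k : Int), Dom_func val a k → Spec_func val a k (func val a k)

-- ===== LEMMAS AND PROOFS =====

-- ===== VERDICT (by name: the statement is the Claim_ definition above) =====
lemma aLoop_cons (val x : Int) (r : List Int) :
    aLoop val (x :: r) = if x ≤ val then 1 + aLoop val r.tail else aLoop val r := by
  cases r with
  | nil => simp [aLoop]
  | cons y r2 => simp [aLoop]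

lemma key (val : Int) (l : List Int) : ∀ (s : Int),
    (max (l.foldl (bStep val) (s, s)).1 (l.foldl (bStep val) (s, s)).2 = s + aLoop val l) ∧
    (max (l.foldl (bStep val) (s, s + 1)).1 (l.foldl (bStep val) (s, s + 1)).2
      = s + 1 + aLoop val l.tail) := by
  induction l with
  | nil => intro s; constructor <;> simp [aLoop]
  | cons x r ih =>
    intro s
    constructor
    · rw [aLoop_cons]
      by_cases h : x ≤ val
      · have := (ih s).2
        simp only [List.foldl, bStep, if_pos h, max_self]
        omega
      · have := (ih s).1
        simp only [List.foldl, bStep, if_neg h, max_self]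
        omega
    · have hmax : max s (s + 1) = s + 1 := by omega
      have := (ih (s + 1)).1
      simp only [List.foldl, bStep, hmax]
      by_cases h : x ≤ val
      · simp only [if_pos h, List.tail_cons]
        omega
      · simp only [if_neg h, List.tail_cons]
        omega

theorem func_spec : Claim_equal_func := by
  intro val a k _
  unfold Spec_func func func_alt
  have := (key val a 0).1
  simp only [zero_add] at this
  rw [this]
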